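-- pv_equiv track=rewrite | github.com/TomaszRoksz/Graphs_Python | Ex_7_Perfect_Matching.py | graphPerfectMatching
-- ===== SOURCE A (Python) =====
-- def powerset(seq):
--     """
--     Returns all the subsets of this set. This is a generator.
--     """
--     if not seq:
--         yield seq
--         yield []
--     else:
--         for item in powerset(seq[1:]):
--             yield [seq[0]]+item
--             yield item
--
-- def graphPerfectMatching(graph, colors):
--
--     acceptedHusbands=[]
--     nWifes=0
--     wifes=[]
--     husbands=[]
--
--     for i in range(len(colors)):
--         if colors[i]=="red":
--             wifes.append(i+1)
--         elif colors[i]=="blue":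
--             husbands.append(i+1)
--
--     if husbands<wifes:
--         wifes, husbands = husbands, wifes
--
--     subsets = [x for x in powerset(wifes)]
--
--
--     for subset in subsets:
--         for wife in subset:
--             for man in graph[wife-1]:
--                 if man not in acceptedHusbands:
--                     acceptedHusbands.append(man)
--         if len(acceptedHusbands)<len(subset):
--             return False
--         else: acceptedHusbands=[]
--
--     return True
-- ===== SOURCE B (Python) =====
-- def graphPerfectMatching(graph, colors):
--     # Backtracking search for a system of distinct representatives (a matching
--     # saturating the checked side) instead of enumerating all subsets:
--     # by Hall's marriage theorem the answers coincide.
--     wifes = [i + 1 for i in range(len(colors)) if colors[i] == "red"]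
--     husbands = [i + 1 for i in range(len(colors)) if colors[i] == "blue"]
--     side = husbands if husbands < wifes else wifes
--
--     def assign(rest, used):
--         if not rest:
--             return True
--         w = rest[0]
--         for h in graph[w - 1]:
--             if h not in used and assign(rest[1:], used | {h}):
--                 return True
--         return False
--
--     return assign(side, frozenset())
-- ===== Notes on version B (the rewrite author's own statement) =====
-- stated objective: alternative
-- what changed: A verifies Hall's condition by enumerating every subset of the checked side and counting the distinct neighbours of each; B instead runs a backtracking search for a system of distinct representatives (a matching saturating that side), which by Hall's marriage theorem returns the same answer.
import Mathlib
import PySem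

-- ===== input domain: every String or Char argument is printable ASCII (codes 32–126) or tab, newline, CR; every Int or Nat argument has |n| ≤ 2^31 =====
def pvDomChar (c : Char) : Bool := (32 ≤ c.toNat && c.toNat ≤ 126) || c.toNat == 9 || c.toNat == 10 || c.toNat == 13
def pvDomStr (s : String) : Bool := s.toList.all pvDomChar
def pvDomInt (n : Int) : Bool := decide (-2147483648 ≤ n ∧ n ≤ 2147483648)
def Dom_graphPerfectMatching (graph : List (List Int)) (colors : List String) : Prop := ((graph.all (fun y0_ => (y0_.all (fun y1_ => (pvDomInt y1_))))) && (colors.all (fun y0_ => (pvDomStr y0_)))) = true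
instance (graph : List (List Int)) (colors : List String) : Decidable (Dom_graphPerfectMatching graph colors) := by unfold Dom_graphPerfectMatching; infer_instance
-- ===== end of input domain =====

-- B replaces A's enumeration of all subsets of one side (Hall's condition) by a
-- backtracking search for a system of distinct representatives; by Hall's
-- marriage theorem the two answers coincide (objective: alternative algorithm).


-- ===== PORT A =====
-- powerset generator (hand-ported, exact: the base case yields [] twice, the
-- cons case yields [seq[0]]+item then item for each item of powerset(seq[1:]))
def pvPowersetA : List Int → List (List Int)
  | [] => [[], []]
  | x :: xs => (pvPowersetA xs).flatMap (fun item => [x :: item, item])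

-- Python's '<' on lists of ints (lexicographic), hand-ported, exact
def pvListLt : List Int → List Int → Bool
  | _, [] => false
  | [], _ :: _ => true
  | a :: as, b :: bs => if a < b then true else if b < a then false else pvListLt as bs

-- the "for i in range(len(colors))" loop building (wifes, husbands)
def pvPartitionA (colors : List String) : List Int × List Int :=
  (PySem.List.pyRange 0 (colors.length : Int) 1).foldl
    (fun p i =>
      if PySem.List.pyGetD colors i "" = "red" then (p.1 ++ [i + 1], p.2)
      else if PySem.List.pyGetD colors i "" = "blue" then (p.1, p.2 ++ [i + 1])
      else p)
    ([], [])

-- the acceptedHusbands loop for one subset ('for wife in subset: for man in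
-- graph[wife-1]: if man not in acceptedHusbands: append').  graph[wife-1] is
-- pyGet? with default []: exact wherever Python does not raise IndexError
-- (outside Pre_ nothing is claimed).
def pvAccumA (graph : List (List Int)) (acc : List Int) (subset : List Int) : List Int :=
  subset.foldl (fun acc wife =>
    ((PySem.List.pyGet? graph (wife - 1)).getD []).foldl
      (fun a man => if man ∈ a then a else a ++ [man]) acc) acc

-- the 'for subset in subsets' loop with its early 'return False'
def pvLoopA (graph : List (List Int)) : List (List Int) → Bool
  | [] => true
  | s :: rest => if (pvAccumA graph [] s).length < s.length then false else pvLoopA graph rest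

def graphPerfectMatching (graph : List (List Int)) (colors : List String) : Bool :=
  let p := pvPartitionA colors
  let wh := if pvListLt p.2 p.1 then (p.2, p.1) else (p.1, p.2)
  pvLoopA graph (pvPowersetA wh.1)

-- ===== PORT B =====
-- the two list comprehensions of Source B
def pvReds (colors : List String) : List Int :=
  (PySem.List.pyRange 0 (colors.length : Int) 1).filterMap
    (fun i => if PySem.List.pyGetD colors i "" = "red" then some (i + 1) else none)

def pvBlues (colors : List String) : List Int :=
  (PySem.List.pyRange 0 (colors.length : Int) 1).filterMap
    (fun i => if PySem.List.pyGetD colors i "" = "blue" then some (i + 1) else none)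

-- Source B's recursive 'assign(rest, used)' (backtracking SDR search); graph[w-1]
-- as in pvAccumA: pyGet? with default [], exact where Python does not raise
def pvAssign (graph : List (List Int)) : List Int → PySem.Set Int → Bool
  | [], _ => true
  | w :: rest, used =>
      ((PySem.List.pyGet? graph (w - 1)).getD []).any
        (fun h => !(PySem.Set.contains used h) && pvAssign graph rest (PySem.Set.add used h))

def graphPerfectMatching_alt (graph : List (List Int)) (colors : List String) : Bool :=
  let wifes := pvReds colors
  let husbands := pvBlues colors
  let side := if pvListLt husbands wifes then husbands else wifes
  pvAssign graph side PySem.Set.empty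

-- ===== PRECONDITION & SPEC =====
-- the side of the graph whose saturation A checks (Python's 'husbands if
-- husbands < wifes else wifes'; Lean's `<` on List Int is the same
-- lexicographic order as Python's on lists of ints)
def pvSide (colors : List String) : List Int :=
  if pvBlues colors < pvReds colors then pvBlues colors else pvReds colors

-- Pre_ excludes exactly the inputs where Python A raises IndexError: some
-- checked vertex w has no row graph[w-1].
def Pre_graphPerfectMatching (graph : List (List Int)) (colors : List String) : Prop :=
  ∀ w ∈ pvSide colors, w ≤ (graph.length : Int)
instance (graph : List (List Int)) (colors : List String) : Decidable (Pre_graphPerfectMatching graph colors) := by unfold Pre_graphPerfectMatching; infer_instance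

def pvWitness_graphPerfectMatching : List (List Int) × List String :=
  ([[2], [1, 2]], ["red", "blue"])

def Spec_graphPerfectMatching (graph : List (List Int)) (colors : List String) (out : Bool) : Prop := out = graphPerfectMatching_alt graph colors
instance (graph : List (List Int)) (colors : List String) (out : Bool) : Decidable (Spec_graphPerfectMatching graph colors out) := by unfold Spec_graphPerfectMatching; infer_instance

-- ===== CLAIM (what is proved, stated in full; the proofs are below) =====
def Claim_equal_graphPerfectMatching : Prop := ∀ (graph : List (List Int)) (colors : List String), Dom_graphPerfectMatching graph colors → Pre_graphPerfectMatching graph colors → Spec_graphPerfectMatching graph colors (graphPerfectMatching graph colors)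

-- ===== LEMMAS AND PROOFS =====

-- the neighbour rows both ports read
def pvNbr (graph : List (List Int)) (w : Int) : List Int :=
  (PySem.List.pyGet? graph (w - 1)).getD []

-- A's partition loop computes B's two comprehensions
theorem pvPartition_core (colors : List String) (l : List Int) (a b : List Int) :
    l.foldl (fun p i =>
      if PySem.List.pyGetD colors i "" = "red" then (p.1 ++ [i + 1], p.2)
      else if PySem.List.pyGetD colors i "" = "blue" then (p.1, p.2 ++ [i + 1])
      else p) (a, b)
    = (a ++ l.filterMap (fun i => if PySem.List.pyGetD colors i "" = "red" then some (i + 1) else none),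
       b ++ l.filterMap (fun i => if PySem.List.pyGetD colors i "" = "blue" then some (i + 1) else none)) := by
  induction l generalizing a b with
  | nil => simp
  | cons x xs ih =>
    simp only [List.foldl_cons, List.filterMap_cons]
    by_cases hr : PySem.List.pyGetD colors x "" = "red"
    · have hb : ¬ PySem.List.pyGetD colors x "" = "blue" := by rw [hr]; decide
      simp [hr, ih]
    · by_cases hb : PySem.List.pyGetD colors x "" = "blue"
      · simp [hb, ih]
      · simp [hr, hb, ih]

theorem pvPartitionA_eq (colors : List String) :
    pvPartitionA colors = (pvReds colors, pvBlues colors) := by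
  unfold pvPartitionA pvReds pvBlues
  rw [pvPartition_core]
  simp

-- powerset enumerates exactly the sublists
theorem mem_pvPowersetA (s l : List Int) : s ∈ pvPowersetA l ↔ s.Sublist l := by
  induction l generalizing s with
  | nil =>
    simp only [pvPowersetA, List.mem_cons, List.sublist_nil]
    constructor
    · rintro (rfl | rfl | h) <;> first | rfl | cases h
    · rintro rfl; left; rfl
  | cons x xs ih =>
    simp only [pvPowersetA, List.mem_flatMap, List.mem_cons,
      List.sublist_cons_iff]
    constructor
    · rintro ⟨item, hitem, rfl | rfl | h⟩
      · exact Or.inr ⟨item, rfl, (ih item).mp hitem⟩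
      · exact Or.inl ((ih s).mp hitem)
      · cases h
    · rintro (h | ⟨r, rfl, hr⟩)
      · exact ⟨s, (ih s).mpr h, Or.inr (Or.inl rfl)⟩
      · exact ⟨r, (ih r).mpr hr, Or.inl rfl⟩

-- the subset loop is a ∀ over the enumerated subsets
theorem pvLoopA_eq_true_iff (graph : List (List Int)) (L : List (List Int)) :
    pvLoopA graph L = true ↔ ∀ s ∈ L, s.length ≤ (pvAccumA graph [] s).length := by
  induction L with
  | nil => simp [pvLoopA]
  | cons s rest ih =>
    simp only [pvLoopA, List.mem_cons]
    split_ifs with h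
    · simp only [false_iff]
      intro hall
      exact absurd (hall s (Or.inl rfl)) (by omega)
    · rw [ih]
      constructor
      · rintro hall t (rfl | ht)
        · omega
        · exact hall t ht
      · intro hall t ht; exact hall t (Or.inr ht)

-- the acceptedHusbands loop is dedup of the concatenated neighbour rows
theorem pvAccumA_core (graph : List (List Int)) (s : List Int) (acc : List Int) :
    pvAccumA graph acc s = (s.flatMap (pvNbr graph)).foldl PySem.Set.add acc := by
  have hfun : (fun (a : List Int) (man : Int) => if man ∈ a then a else a ++ [man])
      = PySem.Set.add := by
    funext a m; rw [PySem.Set.add_eq_ite]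
  induction s generalizing acc with
  | nil => simp [pvAccumA]
  | cons w s ih =>
    simp only [pvAccumA, List.foldl_cons, List.flatMap_cons, List.foldl_append] at *
    rw [← ih]
    simp [pvNbr, hfun]

theorem pvAccumA_eq (graph : List (List Int)) (s : List Int) :
    pvAccumA graph [] s = PySem.Set.ofList (s.flatMap (pvNbr graph)) := by
  rw [pvAccumA_core, PySem.Set.ofList_eq_foldl]

theorem length_pvAccumA (graph : List (List Int)) (s : List Int) :
    (pvAccumA graph [] s).length = (s.flatMap (pvNbr graph)).toFinset.card := by
  rw [pvAccumA_eq]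
  have hnd := PySem.Set.nodup_ofList (xs := s.flatMap (pvNbr graph))
  rw [← List.toFinset_card_of_nodup hnd]
  congr 1
  ext x
  simp [PySem.Set.mem_ofList]

-- A = true ↔ Hall's condition over sublists of the side
theorem portA_iff (graph : List (List Int)) (side : List Int) :
    pvLoopA graph (pvPowersetA side) = true ↔
      ∀ s : List Int, s.Sublist side → s.length ≤ (s.flatMap (pvNbr graph)).toFinset.card := by
  rw [pvLoopA_eq_true_iff]
  constructor
  · intro h s hs
    have := h s ((mem_pvPowersetA s side).mpr hs)
    rwa [length_pvAccumA] at this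
  · intro h s hs
    rw [length_pvAccumA]
    exact h s ((mem_pvPowersetA s side).mp hs)

-- B = true ↔ a system of distinct representatives avoiding `used` exists
theorem pvAssign_iff (graph : List (List Int)) (rest : List Int) (used : PySem.Set Int) :
    pvAssign graph rest used = true ↔
      ∃ hs : List Int, List.Forall₂ (fun w h => h ∈ pvNbr graph w) rest hs ∧
        hs.Nodup ∧ ∀ h ∈ hs, h ∉ used := by
  induction rest generalizing used with
  | nil =>
    simp only [pvAssign, true_iff]
    exact ⟨[], List.Forall₂.nil, List.nodup_nil, by simp⟩
  | cons w rest ih =>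
    simp only [pvAssign, List.any_eq_true, Bool.and_eq_true, Bool.not_eq_true']
    constructor
    · rintro ⟨h, hmem, hnc, hrec⟩
      have hnu : h ∉ used := fun hc => by
        rw [(PySem.Set.contains_iff used h).mpr hc] at hnc; cases hnc
      obtain ⟨hs, hf, hnd, havoid⟩ := (ih _).mp hrec
      have hnotin : h ∉ hs := fun hc =>
        (havoid h hc) ((PySem.Set.mem_add used h h).mpr (Or.inr rfl))
      refine ⟨h :: hs, List.Forall₂.cons hmem hf, List.nodup_cons.mpr ⟨hnotin, hnd⟩, ?_⟩
      intro y hy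
      rcases List.mem_cons.mp hy with rfl | hy'
      · exact hnu
      · intro hc
        exact (havoid y hy') ((PySem.Set.mem_add used h y).mpr (Or.inl hc))
    · rintro ⟨hs, hf, hnd, havoid⟩
      cases hf with
      | cons hR hf' =>
        rename_i h hs'
        have hnd' := (List.nodup_cons.mp hnd)
        refine ⟨h, hR, ?_, (ih _).mpr ⟨hs', hf', hnd'.2, ?_⟩⟩
        · by_contra hc
          rw [Bool.not_eq_false, PySem.Set.contains_iff] at hc
          exact havoid h (List.mem_cons_self ..) hc
        · intro y hy hc
          rcases (PySem.Set.mem_add used h y).mp hc with hc' | rfl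
          · exact havoid y (List.mem_cons_of_mem _ hy) hc'
          · exact hnd'.1 hy

-- (l.flatMap g).toFinset as a biUnion
theorem toFinset_flatMap (l : List Int) (g : Int → List Int) :
    (l.flatMap g).toFinset = l.toFinset.biUnion (fun x => (g x).toFinset) := by
  induction l with
  | nil => simp
  | cons x xs ih => simp [List.flatMap_cons, ih]

-- Hall's condition over sublists ↔ an SDR exists (via Mathlib's marriage theorem)
theorem hall_list (nbr : Int → List Int) (side : List Int) (hnd : side.Nodup) :
    (∀ s : List Int, s.Sublist side → s.length ≤ (s.flatMap nbr).toFinset.card) ↔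
      ∃ hs : List Int, List.Forall₂ (fun w h => h ∈ nbr w) side hs ∧ hs.Nodup := by
  classical
  have hget : Function.Injective (fun i : Fin side.length => side.get i) :=
    List.nodup_iff_injective_get.mp hnd
  have mathlib := Finset.all_card_le_biUnion_card_iff_exists_injective
    (fun i : Fin side.length => (nbr (side.get i)).toFinset)
  constructor
  · intro hsub
    have hfin : ∀ s : Finset (Fin side.length),
        s.card ≤ (s.biUnion (fun i => (nbr (side.get i)).toFinset)).card := by
      intro s
      set S := side.filter (fun x => decide (∃ i ∈ s, side.get i = x)) with hS
      have hSsub : S.Sublist side := List.filter_sublist ..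
      have hmemS : ∀ x, x ∈ S ↔ ∃ i ∈ s, side.get i = x := by
        intro x
        constructor
        · intro hx
          have := (List.mem_filter.mp hx).2
          simpa using this
        · rintro ⟨i, hi, rfl⟩
          exact List.mem_filter.mpr ⟨List.get_mem side i,
            by simp only [decide_eq_true_eq]; exact ⟨i, hi, rfl⟩⟩
      have hSt : S.toFinset = s.image (fun i => side.get i) := by
        ext x
        simp only [List.mem_toFinset, hmemS x, Finset.mem_image]
      have hcard : S.length = s.card := by
        rw [← List.toFinset_card_of_nodup (hSsub.nodup hnd), hSt,
          Finset.card_image_of_injective _ hget]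
      have hbi : (S.flatMap nbr).toFinset
          = s.biUnion (fun i => (nbr (side.get i)).toFinset) := by
        rw [toFinset_flatMap, hSt, Finset.image_biUnion]
      have := hsub S hSsub
      rwa [hcard, hbi] at this
    obtain ⟨f, hfinj, hft⟩ := mathlib.mp hfin
    refine ⟨List.ofFn f, ?_, List.nodup_ofFn.mpr hfinj⟩
    rw [List.forall₂_iff_get]
    refine ⟨by simp, ?_⟩
    intro i h1 h2
    have := hft ⟨i, h1⟩
    rw [List.mem_toFinset] at this
    simpa using this
  · rintro ⟨hs, hf, hnd2⟩
    intro S hSsub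
    have hlen : side.length = hs.length := hf.length_eq
    have hfget := List.forall₂_iff_get.mp hf
    have hfin : ∀ s : Finset (Fin side.length),
        s.card ≤ (s.biUnion (fun i => (nbr (side.get i)).toFinset)).card := by
      apply mathlib.mpr
      refine ⟨fun i => hs.get ⟨i.1, by omega⟩, ?_, ?_⟩
      · intro i j hij
        have := List.nodup_iff_injective_get.mp hnd2 hij
        have h2 : i.1 = j.1 := by simpa using this
        exact Fin.ext h2
      · intro i
        rw [List.mem_toFinset]
        exact hfget.2 i.1 i.2 (by omega)
    set s : Finset (Fin side.length) := Finset.univ.filter (fun i => side.get i ∈ S) with hs'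
    have hSt : S.toFinset = s.image (fun i => side.get i) := by
      ext x
      simp only [List.mem_toFinset, Finset.mem_image, hs', Finset.mem_filter,
        Finset.mem_univ, true_and]
      constructor
      · intro hx
        obtain ⟨i, hi⟩ := List.mem_iff_get.mp (hSsub.subset hx)
        exact ⟨i, by rw [hi]; exact hx, hi⟩
      · rintro ⟨i, hiS, rfl⟩
        exact hiS
    have hcard : S.length = s.card := by
      rw [← List.toFinset_card_of_nodup (hSsub.nodup hnd), hSt,
        Finset.card_image_of_injective _ hget]
    have hbi : (S.flatMap nbr).toFinset
        = s.biUnion (fun i => (nbr (side.get i)).toFinset) := by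
      rw [toFinset_flatMap, hSt, Finset.image_biUnion]
    rw [hcard, hbi]
    exact hfin s

-- the checked side has no duplicate vertices
theorem pvFilterMap_nodup (colors : List String) (c : String) :
    ((PySem.List.pyRange 0 (colors.length : Int) 1).filterMap
      (fun i => if PySem.List.pyGetD colors i "" = c then some (i + 1) else none)).Nodup := by
  have hpw := PySem.List.pairwise_lt_pyRange_one (a := 0) (b := (colors.length : Int))
  have : ((PySem.List.pyRange 0 (colors.length : Int) 1).filterMap
      (fun i => if PySem.List.pyGetD colors i "" = c then some (i + 1) else none)).Pairwise (· < ·) := by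
    rw [List.pairwise_filterMap]
    refine hpw.imp ?_
    intro a b hab x hx y hy
    split_ifs at hx hy with h1 h2
    simp_all
    omega
  exact this.imp (fun h => ne_of_lt h)

theorem pvReds_nodup (colors : List String) : (pvReds colors).Nodup :=
  pvFilterMap_nodup colors "red"

theorem pvBlues_nodup (colors : List String) : (pvBlues colors).Nodup :=
  pvFilterMap_nodup colors "blue"


-- the core of the equivalence: Hall check = SDR search, for any nodup side
theorem pvMain (graph : List (List Int)) (side : List Int) (hnd : side.Nodup) :
    pvLoopA graph (pvPowersetA side) = pvAssign graph side PySem.Set.empty := by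
  rw [Bool.eq_iff_iff, portA_iff, pvAssign_iff, hall_list (pvNbr graph) side hnd]
  constructor
  · rintro ⟨hs, hf, hnd2⟩
    exact ⟨hs, hf, hnd2, by simp [PySem.Set.empty]⟩
  · rintro ⟨hs, hf, hnd2, _⟩
    exact ⟨hs, hf, hnd2⟩

-- ===== VERDICT (by name: the statement is the Claim_ definition above) =====
theorem graphPerfectMatching_spec : Claim_equal_graphPerfectMatching := by
  intro graph colors _ _
  unfold Spec_graphPerfectMatching graphPerfectMatching graphPerfectMatching_alt
  rw [pvPartitionA_eq]
  by_cases h : pvListLt (pvBlues colors) (pvReds colors)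
  · simp only [h, if_true]
    exact pvMain graph (pvBlues colors) (pvBlues_nodup colors)
  · simp only [h]
    exact pvMain graph (pvReds colors) (pvReds_nodup colors)
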